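-- pv_equiv track=rewrite | github.com/lukkoeh/ba-poc | src/sdoc_poc/evaluator.py | _fuse_blocks
-- ===== SOURCE A (Python) =====
-- from typing import Dict, List
--
-- def _fuse_blocks(blocks: List[str], max_chars: int = 2000) -> str:
--     """Fügt mehrere Textblöcke zusammen und begrenzt die Gesamtlänge."""
--     out, used = [], 0
--     for i, b in enumerate(blocks):
--         if not b:
--             continue
--         piece = (("\n\n---\n" if i > 0 else "") + b.strip())
--         remain = max_chars - used
--         if remain <= 0:
--             break
--         if len(piece) > remain:
--             out.append(piece[:remain])
--             used += remain
--             break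
--         out.append(piece); used += len(piece)
--     return "".join(out)
-- ===== SOURCE B (Python) =====
-- def _fuse_blocks(blocks, max_chars=2000):
--     """Fügt mehrere Textblöcke zusammen und begrenzt die Gesamtlänge."""
--     pieces = [("\n\n---\n" if i > 0 else "") + b.strip()
--               for i, b in enumerate(blocks) if b]
--     return "".join(pieces)[:max(max_chars, 0)]
-- ===== Notes on version B (the rewrite author's own statement) =====
-- stated objective: simpler
-- what changed: Replaces the incremental budget loop (running 'used' counter, per-iteration 'remain', early break, piecewise truncation) with build-then-truncate: join all pieces in one comprehension and slice the result to max(max_chars, 0).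
import Mathlib
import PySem

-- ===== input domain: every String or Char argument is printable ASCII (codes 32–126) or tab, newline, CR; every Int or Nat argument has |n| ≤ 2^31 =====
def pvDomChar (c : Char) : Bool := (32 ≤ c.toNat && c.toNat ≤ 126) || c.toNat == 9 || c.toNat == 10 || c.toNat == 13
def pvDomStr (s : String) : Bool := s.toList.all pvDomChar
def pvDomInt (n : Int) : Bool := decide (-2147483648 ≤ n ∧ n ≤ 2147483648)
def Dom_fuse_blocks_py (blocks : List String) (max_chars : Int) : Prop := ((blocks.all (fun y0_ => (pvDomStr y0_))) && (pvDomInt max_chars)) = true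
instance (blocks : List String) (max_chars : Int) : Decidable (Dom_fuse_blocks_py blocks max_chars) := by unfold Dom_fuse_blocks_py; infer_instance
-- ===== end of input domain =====

-- B replaces A's incremental budget loop by build-then-truncate (join all pieces, slice to max(max_chars,0)); objective: simpler.

-- ===== PORT A =====
-- the loop of A: state (out, used); break returns out immediately
def fuseA_go : List (Int × String) → Int → List (List Char) → Int → List (List Char)
  | [], _, out, _ => out
  | (i, b) :: rest, max_chars, out, used =>
    if b.toList = [] then fuseA_go rest max_chars out used
    else
      let piece := (if i > 0 then "\n\n---\n".toList else []) ++ PySem.Chars.strip b.toList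
      let remain := max_chars - used
      if remain ≤ 0 then out
      else if (piece.length : Int) > remain then
        out ++ [PySem.List.slice piece none (some remain)]
      else fuseA_go rest max_chars (out ++ [piece]) (used + (piece.length : Int))

def fuse_blocks_py (blocks : List String) (max_chars : Int) : String :=
  String.ofList (PySem.Chars.join [] (fuseA_go (PySem.List.enumerate blocks 0) max_chars [] 0))

-- ===== PORT B =====
def fuse_blocks_py_alt (blocks : List String) (max_chars : Int) : String :=
  String.ofList (PySem.List.slice
    (PySem.Chars.join [] ((PySem.List.enumerate blocks 0).filterMap (fun p =>
      if p.2.toList = [] then none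
      else some ((if p.1 > 0 then "\n\n---\n".toList else []) ++ PySem.Chars.strip p.2.toList))))
    none (some (max max_chars 0)))

-- ===== PRECONDITION & SPEC =====
def Spec_fuse_blocks_py (blocks : List String) (max_chars : Int) (out : String) : Prop := out = fuse_blocks_py_alt blocks max_chars
instance (blocks : List String) (max_chars : Int) (out : String) : Decidable (Spec_fuse_blocks_py blocks max_chars out) := by unfold Spec_fuse_blocks_py; infer_instance

-- ===== CLAIM (what is proved, stated in full; the proofs are below) =====
def Claim_equal_fuse_blocks_py : Prop := ∀ (blocks : List String) (max_chars : Int), Dom_fuse_blocks_py blocks max_chars → Spec_fuse_blocks_py blocks max_chars (fuse_blocks_py blocks max_chars)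

-- ===== LEMMAS AND PROOFS =====

-- "".join is concatenation (the empty-separator case of Chars.join)
lemma joinNilFlatten (parts : List (List Char)) : PySem.Chars.join [] parts = parts.flatten := by
  induction parts with
  | nil => rfl
  | cons x xs ih =>
    cases xs with
    | nil => simp [PySem.Chars.join, List.intercalate]
    | cons y ys =>
      simp only [PySem.Chars.join, List.intercalate] at *
      simp [List.intersperse] at *
      simpa using ih

-- B's piece list, abstracted over the enumerated list (proof-side abbreviation)
def piecesOf (L : List (Int × String)) : List (List Char) :=
  L.filterMap (fun p =>
    if p.2.toList = [] then none
    else some ((if p.1 > 0 then "\n\n---\n".toList else []) ++ PySem.Chars.strip p.2.toList))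

-- when the budget is already exhausted, A's loop only skips empties and then breaks
lemma fuseA_go_of_le (L : List (Int × String)) (mc used : Int) (out : List (List Char))
    (h : mc ≤ used) : fuseA_go L mc out used = out := by
  induction L with
  | nil => rfl
  | cons p rest ih =>
    obtain ⟨i, b⟩ := p
    simp only [fuseA_go]
    split
    · exact ih
    · rw [if_pos (by omega)]

-- loop invariant: A's loop output is the flatten of out plus the budget-truncated flatten of the remaining pieces
lemma fuseA_go_flatten (L : List (Int × String)) (mc used : Int) (out : List (List Char))
    (h : used ≤ mc) :
    (fuseA_go L mc out used).flatten = out.flatten ++ (piecesOf L).flatten.take (mc - used).toNat := by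
  induction L generalizing out used with
  | nil => simp [fuseA_go, piecesOf]
  | cons p rest ih =>
    obtain ⟨i, b⟩ := p
    by_cases hb : b.toList = []
    · simp only [fuseA_go, piecesOf, List.filterMap_cons, hb, if_pos]
      exact ih used out h
    · set piece := (if i > 0 then "\n\n---\n".toList else []) ++ PySem.Chars.strip b.toList with hp
      have hpf : piecesOf ((i, b) :: rest) = piece :: piecesOf rest := by
        simp only [piecesOf, List.filterMap_cons]
        rw [if_neg hb, hp]
      simp only [fuseA_go, if_neg hb]
      by_cases h0 : mc - used ≤ 0
      · have : mc = used := by omega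
        simp [hpf, this]
      · rw [if_neg h0]
        by_cases hlen : (piece.length : Int) > mc - used
        · rw [if_pos hlen]
          rw [show PySem.List.slice piece none (some (mc - used)) = piece.take (mc - used).toNat from PySem.List.slice_to piece (by omega)]
          have htk : (mc - used).toNat ≤ piece.length := by omega
          simp [hpf, List.take_append, Nat.sub_eq_zero_of_le htk]
        · rw [if_neg hlen]
          have hle : (piece.length : Int) ≤ mc - used := by omega
          rw [ih (used + piece.length) (out ++ [piece]) (by omega)]
          have : (mc - (used + piece.length)).toNat = (mc - used).toNat - piece.length := by omega
          simp [hpf, List.take_append, this, List.take_of_length_le (show piece.length ≤ (mc - used).toNat by omega)]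

-- ===== VERDICT (by name: the statement is the Claim_ definition above) =====
theorem fuse_blocks_py_spec : Claim_equal_fuse_blocks_py := by
  intro blocks mc _
  show fuse_blocks_py blocks mc = fuse_blocks_py_alt blocks mc
  unfold fuse_blocks_py fuse_blocks_py_alt
  rw [PySem.List.slice_to _ (by omega : (0:Int) ≤ max mc 0)]
  rw [joinNilFlatten, joinNilFlatten]
  congr 1
  by_cases h : 0 ≤ mc
  · rw [fuseA_go_flatten _ mc 0 [] h]
    simp only [List.flatten_nil, List.nil_append, Int.sub_zero]
    have : (max mc 0) = mc := by omega
    rw [this]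
    rfl
  · rw [fuseA_go_of_le _ mc 0 [] (by omega)]
    have : (max mc 0).toNat = 0 := by omega
    simp [this]
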